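-- pv_equiv track=rewrite | github.com/Veslyquix/SRR_FEGBA | gfx/Palettes/ProcessCSV.py | format_palette
-- ===== SOURCE A (Python) =====
-- num_per_line = 16                # how many hex bytes per BYTE line
--
-- def format_palette(hexstr):
--     """Convert raw hex string into BYTE $.. $.. format."""
--     hexstr = hexstr.strip()
--     if not hexstr:
--         return ""  # skip empty
--     bytes_list = [f"${hexstr[i:i+2]}" for i in range(0, len(hexstr), 2)]
--     lines = []
--     for i in range(0, len(bytes_list), num_per_line):
--         lines.append("BYTE " + " ".join(bytes_list[i:i+num_per_line]))
--     return "\n".join(lines)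
-- ===== SOURCE B (Python) =====
-- num_per_line = 16
--
--
-- def format_palette(hexstr):
--     """Convert raw hex string into BYTE $.. $.. format."""
--     s = hexstr.strip()
--     if not s:
--         return ""
--     out = ""
--     while s:
--         chunk, s = s[:num_per_line * 2], s[num_per_line * 2:]
--         line = "BYTE"
--         while chunk:
--             line += " $" + chunk[:2]
--             chunk = chunk[2:]
--         out = line if not out else out + "\n" + line
--     return out
-- ===== Notes on version B (the rewrite author's own statement) =====
-- stated objective: alternative
-- what changed: A materialises the full list of dollar-prefixed byte tokens with a range comprehension and then regroups it into 16-token slices joined in a second pass; B instead consumes the stripped string destructively with a while loop that slices a 32-character chunk off the front each step and builds the output by string accumulation (no token list, no ranges, no joins).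
import Mathlib
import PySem

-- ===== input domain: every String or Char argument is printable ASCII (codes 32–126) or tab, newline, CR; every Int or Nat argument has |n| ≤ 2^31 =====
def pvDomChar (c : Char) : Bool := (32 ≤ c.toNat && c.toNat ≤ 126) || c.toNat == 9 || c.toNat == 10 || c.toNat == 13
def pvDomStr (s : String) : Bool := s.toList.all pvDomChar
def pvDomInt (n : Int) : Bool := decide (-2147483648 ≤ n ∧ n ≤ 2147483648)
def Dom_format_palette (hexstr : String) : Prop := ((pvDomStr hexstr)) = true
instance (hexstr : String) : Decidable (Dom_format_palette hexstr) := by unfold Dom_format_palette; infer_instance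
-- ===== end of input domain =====

-- B consumes the stripped string with a while loop, slicing 32 characters off the front per line
-- and accumulating the line text directly, instead of A's staged passes (full '$xx' token list,
-- then regrouped 16-token slices joined twice); alternative decomposition, same cost.

-- ===== PORT A =====
def format_palette (hexstr : String) : String :=
  let s := (PySem.Str.strip hexstr).toList
  if s = [] then ""
  else
    let bytes_list :=
      (PySem.List.pyRange 0 (PySem.List.len s) 2).map
        (fun i => '$' :: PySem.List.slice s (some i) (some (i + 2)))
    let lines :=
      (PySem.List.pyRange 0 (PySem.List.len bytes_list) 16).foldl
        (fun acc i =>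
          acc ++ ["BYTE ".toList ++
                  PySem.Chars.join [' '] (PySem.List.slice bytes_list (some i) (some (i + 16)))])
        []
    String.mk (PySem.Chars.join ['\n'] lines)

-- ===== PORT B =====
-- inner while loop of Source B: append " $" + chunk[:2], drop two chars, until chunk is empty
def bBytes (chunk : List Char) : List Char :=
  if h : chunk = [] then []
  else ' ' :: '$' :: chunk.take 2 ++ bBytes (chunk.drop 2)
termination_by chunk.length
decreasing_by
  cases chunk with
  | nil => exact absurd rfl h
  | cons a l => simp

-- outer while loop of Source B: slice 32 chars off the front, build the line, accumulate into out
def bLoop (s : List Char) (out : List Char) : List Char :=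
  if h : s = [] then out
  else
    let line := "BYTE".toList ++ bBytes (s.take 32)
    bLoop (s.drop 32) (if out = [] then line else out ++ '\n' :: line)
termination_by s.length
decreasing_by
  cases s with
  | nil => exact absurd rfl h
  | cons a l => simp

def format_palette_alt (hexstr : String) : String :=
  let s := (PySem.Str.strip hexstr).toList
  if s = [] then ""
  else String.mk (bLoop s [])

-- ===== PRECONDITION & SPEC =====
def Spec_format_palette (hexstr : String) (out : String) : Prop := out = format_palette_alt hexstr
instance (hexstr : String) (out : String) : Decidable (Spec_format_palette hexstr out) := by unfold Spec_format_palette; infer_instance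

-- ===== CLAIM (what is proved, stated in full; the proofs are below) =====
def Claim_equal_format_palette : Prop := ∀ (hexstr : String), Dom_format_palette hexstr → Spec_format_palette hexstr (format_palette hexstr)

-- ===== LEMMAS AND PROOFS =====

-- chunks of size k+1: apply F to each successive (k+1)-sized block
def chunkC {β α : Type} (k : Nat) (F : List β → α) (xs : List β) : List α :=
  if h : xs = [] then []
  else F (xs.take (k + 1)) :: chunkC k F (xs.drop (k + 1))
termination_by xs.length
decreasing_by
  cases xs with
  | nil => exact absurd rfl h
  | cons a l => simp [List.length_drop]

theorem chunkC_nil {β α : Type} (k : Nat) (F : List β → α) : chunkC k F [] = [] := by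
  rw [chunkC]; simp

theorem chunkC_cons {β α : Type} (k : Nat) (F : List β → α) (xs : List β) (h : xs ≠ []) :
    chunkC k F xs = F (xs.take (k + 1)) :: chunkC k F (xs.drop (k + 1)) := by
  rw [chunkC]; simp [h]

theorem range_chunkC {β α : Type} (k : Nat) (F : List β → α) :
    ∀ (xs : List β),
      (List.range ((xs.length + k) / (k + 1))).map
          (fun j => F ((xs.drop ((k + 1) * j)).take (k + 1))) = chunkC k F xs := by
  intro xs
  induction hn : xs.length using Nat.strong_induction_on generalizing xs with
  | _ n ih =>
    subst hn
    cases hx : xs with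
    | nil =>
      subst hx
      have h0 : k / (k + 1) = 0 := Nat.div_eq_of_lt (by omega)
      simp [chunkC_nil, h0]
    | cons a l =>
      rw [← hx]
      have hne : xs ≠ [] := by rw [hx]; simp
      have hlen : 1 ≤ xs.length := by rw [hx]; simp
      have hdiv : (xs.length + k) / (k + 1)
          = ((xs.drop (k + 1)).length + k) / (k + 1) + 1 := by
        rw [List.length_drop]
        by_cases hle : xs.length ≤ k + 1
        · have h1 : (xs.length + k) / (k + 1) = 1 := by
            apply Nat.div_eq_of_lt_le <;> omega
          have h2 : (xs.length - (k + 1) + k) / (k + 1) = 0 :=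
            Nat.div_eq_of_lt (by omega)
          omega
        · have : xs.length + k = (xs.length - (k + 1) + k) + (k + 1) := by omega
          rw [this, Nat.add_div_right _ (by omega)]
      rw [hdiv, List.range_succ_eq_map, List.map_cons, List.map_map]
      rw [chunkC_cons k F xs hne]
      refine congrArg₂ List.cons (by simp) ?_
      · have hih := ih (xs.drop (k + 1)).length (by rw [List.length_drop]; omega)
          (xs.drop (k + 1)) rfl
        rw [List.length_drop] at hih
        rw [← hih, List.length_drop]
        apply List.map_congr_left
        intro j _
        simp only [Function.comp_apply, Nat.succ_eq_add_one]
        congr 1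
        rw [List.drop_drop, Nat.mul_succ, Nat.add_comm ((k + 1) * j) (k + 1)]

theorem pyRange_chunkC {β α : Type} (k : Nat) (F : List β → α) (xs : List β) :
    (PySem.List.pyRange 0 (xs.length : Int) ((k : Int) + 1)).map
        (fun i => F (PySem.List.slice xs (some i) (some (i + ((k : Int) + 1)))))
      = chunkC k F xs := by
  have hk : (0 : Int) < (k : Int) + 1 := by positivity
  rw [PySem.List.pyRange_of_pos _ _ hk, List.map_map]
  have hcount : (if (0 : Int) < (xs.length : Int)
        then (((xs.length : Int) - 0 + ((k : Int) + 1) - 1) / ((k : Int) + 1)).toNat else 0)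
      = (xs.length + k) / (k + 1) := by
    by_cases h0 : (0 : Int) < (xs.length : Int)
    · rw [if_pos h0]
      have : ((xs.length : Int) - 0 + ((k : Int) + 1) - 1) = ((xs.length + k : Nat) : Int) := by
        push_cast; ring
      rw [this]
      have : ((k : Int) + 1) = ((k + 1 : Nat) : Int) := by push_cast; ring
      rw [this, ← Int.natCast_div, Int.toNat_natCast]
    · rw [if_neg h0]
      have hx0 : xs.length = 0 := by omega
      rw [hx0]
      rw [Nat.div_eq_of_lt (by omega)]
  rw [hcount, ← range_chunkC k F xs]
  apply List.map_congr_left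
  intro j _
  simp only [Function.comp_apply]
  congr 1
  have h1 : (0 : Int) + ((k : Int) + 1) * (j : Int) = (((k + 1) * j : Nat) : Int) := by
    push_cast; ring
  have h2 : (0 : Int) + ((k : Int) + 1) * (j : Int) + ((k : Int) + 1)
      = (((k + 1) * j : Nat) : Int) + ((k + 1 : Nat) : Int) := by push_cast; ring
  rw [h2, h1, PySem.List.slice_natCast_add]

-- specialisations at the literal steps A uses
theorem pyRange_chunk2 {β α : Type} (F : List β → α) (xs : List β) :
    (PySem.List.pyRange 0 (xs.length : Int) 2).map
        (fun i => F (PySem.List.slice xs (some i) (some (i + 2)))) = chunkC 1 F xs := by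
  have := pyRange_chunkC 1 F xs
  norm_num at this
  exact this

theorem pyRange_chunk16 {β α : Type} (F : List β → α) (xs : List β) :
    (PySem.List.pyRange 0 (xs.length : Int) 16).map
        (fun i => F (PySem.List.slice xs (some i) (some (i + 16)))) = chunkC 15 F xs := by
  have := pyRange_chunkC 15 F xs
  norm_num at this
  exact this

theorem chunkC_take {β α : Type} (k : Nat) (f : List β → α) :
    ∀ (m : Nat) (xs : List β), chunkC k f (xs.take (m * (k + 1))) = (chunkC k f xs).take m := by
  intro m
  induction m with
  | zero => intro xs; simp [chunkC_nil]
  | succ m ih =>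
    intro xs
    cases hx : xs with
    | nil => simp [chunkC_nil]
    | cons a l =>
      rw [← hx]
      have hmul : (m + 1) * (k + 1) = m * (k + 1) + (k + 1) := Nat.succ_mul m (k + 1)
      have hne : xs ≠ [] := by rw [hx]; simp
      have hne' : xs.take ((m + 1) * (k + 1)) ≠ [] := by
        rw [hx]
        simp only [ne_eq, List.take_eq_nil_iff]
        rintro (hc | hc)
        · exact Nat.mul_ne_zero (Nat.succ_ne_zero m) (Nat.succ_ne_zero k) hc
        · simp at hc
      rw [chunkC_cons k f _ hne', chunkC_cons k f xs hne, List.take_succ_cons]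
      have hle : k + 1 ≤ (m + 1) * (k + 1) := Nat.le_mul_of_pos_left (k + 1) (Nat.succ_pos m)
      congr 1
      · rw [List.take_take, Nat.min_eq_left hle]
      · rw [List.drop_take]
        have h2 : (m + 1) * (k + 1) - (k + 1) = m * (k + 1) := by
          rw [hmul, Nat.add_sub_cancel]
        rw [h2, ih]

theorem chunkC_drop {β α : Type} (k : Nat) (f : List β → α) :
    ∀ (m : Nat) (xs : List β), chunkC k f (xs.drop (m * (k + 1))) = (chunkC k f xs).drop m := by
  intro m
  induction m with
  | zero => simp
  | succ m ih =>
    intro xs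
    cases hx : xs with
    | nil => simp [chunkC_nil]
    | cons a l =>
      rw [← hx]
      have hne : xs ≠ [] := by rw [hx]; simp
      rw [chunkC_cons k f xs hne, List.drop_succ_cons, ← ih (xs.drop (k + 1)),
        List.drop_drop]
      congr 2
      rw [Nat.succ_mul]
      exact Nat.add_comm _ _

theorem chunkC_compose {β α : Type} (f : List Char → List β) (G : List (List β) → α) :
    ∀ (s : List Char), chunkC 15 G (chunkC 1 f s) = chunkC 31 (fun c => G (chunkC 1 f c)) s := by
  intro s
  induction hn : s.length using Nat.strong_induction_on generalizing s with
  | _ n ih =>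
    subst hn
    cases hx : s with
    | nil => simp [chunkC_nil]
    | cons a l =>
      rw [← hx]
      have hne : s ≠ [] := by rw [hx]; simp
      have hlen : 1 ≤ s.length := by rw [hx]; simp
      have hne2 : chunkC 1 f s ≠ [] := by rw [chunkC_cons 1 f s hne]; simp
      rw [chunkC_cons 15 G _ hne2, chunkC_cons 31 _ s hne]
      have h16 : (chunkC 1 f s).take 16 = chunkC 1 f (s.take 32) := by
        have := chunkC_take 1 f 16 s; norm_num at this ⊢; exact this.symm
      have h16' : (chunkC 1 f s).drop 16 = chunkC 1 f (s.drop 32) := by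
        have := chunkC_drop 1 f 16 s; norm_num at this ⊢; exact this.symm
      rw [h16, h16']
      congr 1
      exact ih (s.drop 32).length (by rw [List.length_drop]; omega) _ rfl

-- A's line body, as a function of the 32-character chunk
def lineF (c : List Char) : List Char :=
  "BYTE ".toList ++ PySem.Chars.join [' '] (chunkC 1 (fun cc => '$' :: cc) c)

theorem bBytes_eq : ∀ (c : List Char), c ≠ [] →
    bBytes c = ' ' :: PySem.Chars.join [' '] (chunkC 1 (fun cc => '$' :: cc) c) := by
  intro c
  induction hn : c.length using Nat.strong_induction_on generalizing c with
  | _ n ih =>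
    subst hn
    intro hne
    rw [bBytes]
    rw [dif_neg hne, chunkC_cons 1 _ c hne]
    by_cases hd : c.drop 2 = []
    · rw [hd, chunkC_nil]
      simp [bBytes, PySem.Chars.join, List.intercalate]
    · have hih := ih (c.drop 2).length (by cases c with
        | nil => exact absurd rfl hne
        | cons a l => simp) (c.drop 2) rfl hd
      rw [hih]
      rw [chunkC_cons 1 _ (c.drop 2) hd] at hih ⊢
      rw [PySem.Chars.join_cons_cons]
      simp

theorem lineF_eq (c : List Char) (hne : c ≠ []) :
    lineF c = "BYTE".toList ++ bBytes c := by
  rw [lineF, bBytes_eq c hne]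
  rfl

theorem bLoop_eq : ∀ (s : List Char), s ≠ [] → ∀ (out : List Char),
    bLoop s out = (if out = [] then [] else out ++ ['\n'])
      ++ PySem.Chars.join ['\n'] (chunkC 31 lineF s) := by
  intro s
  induction hn : s.length using Nat.strong_induction_on generalizing s with
  | _ n ih =>
    subst hn
    intro hne out
    rw [bLoop, dif_neg hne, chunkC_cons 31 lineF s hne]
    have htk : s.take 32 ≠ [] := by
      cases s with
      | nil => exact absurd rfl hne
      | cons a l => simp
    have hline : "BYTE".toList ++ bBytes (s.take 32) = lineF (s.take 32) :=
      (lineF_eq _ htk).symm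
    have hlne : lineF (s.take 32) ≠ [] := by rw [lineF]; simp
    by_cases hd : s.drop 32 = []
    · rw [bLoop, dif_pos hd, hd, chunkC_nil]
      rw [hline]
      by_cases ho : out = []
      · simp [ho, PySem.Chars.join, List.intercalate]
      · rw [if_neg ho, if_neg ho]
        simp [PySem.Chars.join, List.intercalate]
    · have hdl : (s.drop 32).length < s.length := by
        cases s with
        | nil => exact absurd rfl hne
        | cons a l => simp
      have hih := ih (s.drop 32).length hdl (s.drop 32) rfl hd
      rw [hline]
      have hch : chunkC 31 lineF (s.drop 32) ≠ [] := by
        rw [chunkC_cons 31 lineF (s.drop 32) hd]; simp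
      obtain ⟨q, rest, hqr⟩ := List.exists_cons_of_ne_nil hch
      rw [hqr, PySem.Chars.join_cons_cons]
      by_cases ho : out = []
      · rw [if_pos ho, hih (if out = [] then lineF (s.take 32)
          else out ++ '\n' :: lineF (s.take 32))]
        rw [if_pos ho, if_neg hlne, hqr]
        simp
      · rw [if_neg ho, hih _]
        have : (if out = [] then lineF (s.take 32) else out ++ '\n' :: lineF (s.take 32))
            = out ++ '\n' :: lineF (s.take 32) := if_neg ho
        rw [this, if_neg (by simp), hqr]
        simp

-- ===== VERDICT (by name: the statement is the Claim_ definition above) =====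
theorem format_palette_spec : Claim_equal_format_palette := by
  intro hexstr _
  unfold Spec_format_palette format_palette format_palette_alt
  by_cases h : (PySem.Str.strip hexstr).toList = []
  · simp only [h, if_pos]
  · simp only [h, PySem.List.len_eq, if_neg h]
    rw [PySem.List.foldl_append_singleton_eq_map]
    rw [pyRange_chunk2 (fun c => '$' :: c) ((PySem.Str.strip hexstr).toList)]
    rw [pyRange_chunk16 (fun grp => "BYTE ".toList ++ PySem.Chars.join [' '] grp)
      (chunkC 1 (fun c => '$' :: c) ((PySem.Str.strip hexstr).toList))]
    rw [chunkC_compose (fun c => '$' :: c)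
      (fun grp => "BYTE ".toList ++ PySem.Chars.join [' '] grp) ((PySem.Str.strip hexstr).toList)]
    rw [bLoop_eq _ h []]
    rfl
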